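-- pv_equiv track=rewrite | github.com/polarmutex/advent-of-code | py_aoc/year_2021/day17.py | find_x_vel_ranges
-- ===== SOURCE A (Python) =====
-- from typing import List, Tuple, Generator, Set, Dict, NamedTuple
--
-- def find_x_vel_ranges(target: Tuple[int, int]) -> Tuple[int, int]:
--     min_steps: int = 0
--     sum: int = 0
--     while sum < target[0]:
--         min_steps += 1
--         sum += min_steps
--     lowest_x_vel: int = min_steps
--     highest_x_vel: int = target[1]
--     return (lowest_x_vel, highest_x_vel)
-- ===== SOURCE B (Python) =====
-- def find_x_vel_ranges(target):
--     # Binary search for the least n whose triangular number reaches the first bound.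
--     t0 = target[0]
--     t1 = target[1]
--     lo = 0
--     hi = t0 if t0 > 0 else 0
--     while lo < hi:
--         mid = (lo + hi) // 2
--         if mid * (mid + 1) // 2 >= t0:
--             hi = mid
--         else:
--             lo = mid + 1
--     return (lo, t1)
-- ===== Notes on version B (the rewrite author's own statement) =====
-- stated objective: alternative
-- what changed: Replaced the linear accumulate-until-threshold loop with a binary search over n using the closed-form triangular number n*(n+1)//2.
import Mathlib
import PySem

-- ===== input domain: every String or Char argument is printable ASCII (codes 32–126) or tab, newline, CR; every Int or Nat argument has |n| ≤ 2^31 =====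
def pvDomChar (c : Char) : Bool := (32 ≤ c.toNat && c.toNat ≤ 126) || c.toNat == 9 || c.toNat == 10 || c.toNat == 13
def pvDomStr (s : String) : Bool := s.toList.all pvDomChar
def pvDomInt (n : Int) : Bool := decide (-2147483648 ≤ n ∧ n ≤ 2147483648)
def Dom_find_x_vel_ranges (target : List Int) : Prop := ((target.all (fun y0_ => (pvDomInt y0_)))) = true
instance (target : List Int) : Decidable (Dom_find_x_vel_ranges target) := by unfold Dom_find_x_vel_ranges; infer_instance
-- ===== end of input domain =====

-- B replaces A's accumulate-until-threshold loop by a binary search on the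
-- closed-form triangular number; return-value equivalence on lists of length ≥ 2.

-- ===== PORT A =====
-- A's while loop: min_steps += 1; sum += min_steps while sum is below the first bound.
-- min_steps only ever counts up from 0, so it is carried as a Nat (same values).
def pvLoopA (t0 : Int) (steps : Nat) (sum : Int) : Int :=
  if sum < t0 then pvLoopA t0 (steps + 1) (sum + (steps + 1)) else (steps : Int)
termination_by (t0 - sum).toNat
decreasing_by omega

def find_x_vel_ranges (target : List Int) : List Int :=
  let t0 := (PySem.List.pyGet? target 0).getD 0   -- in range under Pre_
  let lowest := pvLoopA t0 0 0
  let highest := (PySem.List.pyGet? target 1).getD 0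
  [lowest, highest]

-- ===== PORT B =====
def pvBsearch (t0 lo hi : Int) : Int :=
  if h : lo < hi then
    let mid := PySem.Int.floordiv (lo + hi) 2
    if t0 ≤ PySem.Int.floordiv (mid * (mid + 1)) 2 then
      pvBsearch t0 lo mid
    else
      pvBsearch t0 (mid + 1) hi
  else lo
termination_by (hi - lo).toNat
decreasing_by
  · have := PySem.Int.floordiv_two_mid_bounds (le_of_lt h)
    have h2 : PySem.Int.floordiv (lo + hi) 2 < hi := by
      rw [PySem.Int.floordiv_eq_ediv_of_pos (by omega)]; omega
    omega
  · have h2 : lo ≤ PySem.Int.floordiv (lo + hi) 2 := by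
      rw [PySem.Int.floordiv_eq_ediv_of_pos (by omega)]; omega
    omega

def find_x_vel_ranges_alt (target : List Int) : List Int :=
  let t0 := (PySem.List.pyGet? target 0).getD 0
  let t1 := (PySem.List.pyGet? target 1).getD 0
  let hi := if 0 < t0 then t0 else 0
  [pvBsearch t0 0 hi, t1]

-- ===== PRECONDITION & SPEC =====
-- A indexes the first and the second element; with fewer than two elements it raises IndexError.
def Pre_find_x_vel_ranges (target : List Int) : Prop := 2 ≤ target.length
instance (target : List Int) : Decidable (Pre_find_x_vel_ranges target) := by
  unfold Pre_find_x_vel_ranges; infer_instance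

def pvWitness_find_x_vel_ranges : List Int := [5, 10]

def Spec_find_x_vel_ranges (target : List Int) (out : List Int) : Prop := out = find_x_vel_ranges_alt target
instance (target : List Int) (out : List Int) : Decidable (Spec_find_x_vel_ranges target out) := by unfold Spec_find_x_vel_ranges; infer_instance

-- ===== CLAIM (what is proved, stated in full; the proofs are below) =====
def Claim_equal_find_x_vel_ranges : Prop := ∀ (target : List Int), Dom_find_x_vel_ranges target → Pre_find_x_vel_ranges target → Spec_find_x_vel_ranges target (find_x_vel_ranges target)

-- ===== LEMMAS AND PROOFS =====

-- triangular number, n*(n+1)/2 (exact: the product is even)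
def pvTri (n : Int) : Int := n * (n + 1) / 2

lemma pvTri_two_mul (n : Int) : 2 * pvTri n = n * (n + 1) := by
  obtain ⟨r, hr⟩ := Int.even_mul_succ_self n
  unfold pvTri
  rw [hr, show r + r = 2 * r by ring, Int.mul_ediv_cancel_left r (by norm_num)]

lemma pvTri_succ (n : Int) : pvTri (n + 1) = pvTri n + (n + 1) := by
  have h1 := pvTri_two_mul n
  have h2 := pvTri_two_mul (n + 1)
  nlinarith

lemma pvTri_mono {a b : Int} (ha : 0 ≤ a) (hab : a ≤ b) : pvTri a ≤ pvTri b := by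
  have h1 := pvTri_two_mul a
  have h2 := pvTri_two_mul b
  nlinarith

lemma pvLoopA_spec (t0 : Int) (steps : Nat) (sum : Int) (h : sum = pvTri steps) :
    t0 ≤ pvTri (pvLoopA t0 steps sum) ∧ (steps : Int) ≤ pvLoopA t0 steps sum ∧
      ∀ k : Int, (steps : Int) ≤ k → k < pvLoopA t0 steps sum → pvTri k < t0 := by
  fun_induction pvLoopA t0 steps sum with
  | case1 steps sum hlt ih =>
    have hnext : sum + ((steps : Int) + 1) = pvTri (((steps + 1 : Nat) : Int)) := by
      have hc : ((steps + 1 : Nat) : Int) = (steps : Int) + 1 := by push_cast; ring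
      rw [hc, pvTri_succ]
      omega
    obtain ⟨i1, i2, i3⟩ := ih hnext
    push_cast at i2 i3
    refine ⟨i1, by omega, ?_⟩
    intro k hk1 hk2
    by_cases hk : (steps : Int) + 1 ≤ k
    · exact i3 k (by omega) hk2
    · have hkeq : k = (steps : Int) := by omega
      subst hkeq
      omega
  | case2 steps sum hlt =>
    refine ⟨by omega, le_refl _, ?_⟩
    intro k hk1 hk2
    omega

lemma pvBsearch_spec (t0 : Int) (lo hi : Int) (hlo : 0 ≤ lo) (hle : lo ≤ hi)
    (hhi : t0 ≤ pvTri hi) (hbelow : ∀ k : Int, 0 ≤ k → k < lo → pvTri k < t0) :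
    0 ≤ pvBsearch t0 lo hi ∧ t0 ≤ pvTri (pvBsearch t0 lo hi) ∧
      ∀ k : Int, 0 ≤ k → k < pvBsearch t0 lo hi → pvTri k < t0 := by
  fun_induction pvBsearch t0 lo hi with
  | case1 lo hi h mid hcond ih =>
    have hmid : lo ≤ mid ∧ mid < hi := by
      constructor
      · show lo ≤ PySem.Int.floordiv (lo + hi) 2
        rw [PySem.Int.floordiv_eq_ediv_of_pos (by omega)]; omega
      · show PySem.Int.floordiv (lo + hi) 2 < hi
        rw [PySem.Int.floordiv_eq_ediv_of_pos (by omega)]; omega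
    have htri : t0 ≤ pvTri mid := by
      have : PySem.Int.floordiv (mid * (mid + 1)) 2 = pvTri mid := by
        rw [PySem.Int.floordiv_eq_ediv_of_pos (by omega)]; rfl
      omega
    exact ih hlo (by omega) htri hbelow
  | case2 lo hi h mid hcond ih =>
    have hmid : lo ≤ mid ∧ mid < hi := by
      constructor
      · show lo ≤ PySem.Int.floordiv (lo + hi) 2
        rw [PySem.Int.floordiv_eq_ediv_of_pos (by omega)]; omega
      · show PySem.Int.floordiv (lo + hi) 2 < hi
        rw [PySem.Int.floordiv_eq_ediv_of_pos (by omega)]; omega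
    have htri : pvTri mid < t0 := by
      have : PySem.Int.floordiv (mid * (mid + 1)) 2 = pvTri mid := by
        rw [PySem.Int.floordiv_eq_ediv_of_pos (by omega)]; rfl
      omega
    refine ih (by omega) (by omega) hhi ?_
    intro k hk0 hklt
    by_cases hk : k < lo
    · exact hbelow k hk0 hk
    · exact lt_of_le_of_lt (pvTri_mono hk0 (by omega)) htri
  | case3 lo hi h =>
    have : lo = hi := by omega
    subst this
    exact ⟨hlo, hhi, fun k hk0 hklt => hbelow k hk0 hklt⟩

-- the two characterizations pin down a unique value
lemma pv_least_unique {t0 a b : Int}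
    (ha : 0 ≤ a ∧ t0 ≤ pvTri a ∧ ∀ k : Int, 0 ≤ k → k < a → pvTri k < t0)
    (hb : 0 ≤ b ∧ t0 ≤ pvTri b ∧ ∀ k : Int, 0 ≤ k → k < b → pvTri k < t0) : a = b := by
  obtain ⟨ha0, ha1, ha2⟩ := ha
  obtain ⟨hb0, hb1, hb2⟩ := hb
  by_contra hne
  rcases lt_or_gt_of_ne hne with hlt | hlt
  · exact absurd ha1 (not_le.mpr (hb2 a ha0 hlt))
  · exact absurd hb1 (not_le.mpr (ha2 b hb0 hlt))

lemma pv_core_eq (t0 : Int) :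
    pvLoopA t0 0 0 = pvBsearch t0 0 (if 0 < t0 then t0 else 0) := by
  have hA := pvLoopA_spec t0 0 0 (by unfold pvTri; norm_num)
  have hhi : t0 ≤ pvTri (if 0 < t0 then t0 else 0) := by
    split_ifs with h
    · have := pvTri_two_mul t0
      nlinarith
    · unfold pvTri; norm_num; omega
  have hB := pvBsearch_spec t0 0 (if 0 < t0 then t0 else 0) le_rfl
    (by split_ifs with h <;> omega) hhi (by intro k hk0 hklt; omega)
  exact pv_least_unique ⟨by exact_mod_cast hA.2.1, hA.1, by exact_mod_cast hA.2.2⟩ hB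

-- ===== VERDICT (by name: the statement is the Claim_ definition above) =====
theorem find_x_vel_ranges_spec : Claim_equal_find_x_vel_ranges := by
  intro target _ _
  unfold Spec_find_x_vel_ranges find_x_vel_ranges find_x_vel_ranges_alt
  simp only []
  rw [pv_core_eq]
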